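-- pv_equiv track=rewrite | github.com/pypi-data/pypi-mirror-335 | packages/nepali-date-cli/nepali_date_cli-0.1.5.tar.gz/nepali_date_cli-0.1.5/nepali_date_cli/cli.py | to_nepali_numerals
-- ===== SOURCE A (Python) =====
-- def to_nepali_numerals(number):
--     nepali_numerals = {
--         '0': '०',
--         '1': '१',
--         '2': '२',
--         '3': '३',
--         '4': '४',
--         '5': '५',
--         '6': '६',
--         '7': '७',
--         '8': '८',
--         '9': '९'
--     }
--     return ''.join(nepali_numerals.get(digit, digit) for digit in str(number))
-- ===== SOURCE B (Python) =====
-- def to_nepali_numerals(number):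
--     # Build the Nepali digit string arithmetically from the integer itself
--     # (divmod recursion), never converting through str(number).
--     if number < 0:
--         return '-' + to_nepali_numerals(-number)
--     q, r = divmod(number, 10)
--     s = chr(0x0966 + r)
--     return s if q == 0 else to_nepali_numerals(q) + s
-- ===== Notes on version B (the rewrite author's own statement) =====
-- stated objective: alternative
-- what changed: B never calls str() and has no lookup table: it produces Nepali digits directly from the integer by divmod recursion (chr(0x0966 + r) per remainder, recursing on the quotient, with a '-' prefix for negatives), instead of A's per-character dictionary mapping over str(number).
import Mathlib
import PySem

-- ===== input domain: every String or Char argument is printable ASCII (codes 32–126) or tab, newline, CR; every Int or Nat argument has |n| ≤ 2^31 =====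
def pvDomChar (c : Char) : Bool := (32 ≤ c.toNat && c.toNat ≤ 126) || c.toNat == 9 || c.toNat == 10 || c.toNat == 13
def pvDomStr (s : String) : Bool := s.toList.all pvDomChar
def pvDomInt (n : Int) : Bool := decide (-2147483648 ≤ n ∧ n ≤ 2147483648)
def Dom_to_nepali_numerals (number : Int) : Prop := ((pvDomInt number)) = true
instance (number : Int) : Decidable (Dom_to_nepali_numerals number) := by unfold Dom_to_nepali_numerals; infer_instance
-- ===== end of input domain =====

-- B builds the Nepali digit string by divmod recursion on the integer itself (no str(),
-- no lookup table) instead of A's dictionary mapping over str(number); objective: alternative.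

-- ===== PORT A =====
def npDict : PySem.Dict Char Char := PySem.Dict.ofList
  [('0','०'),('1','१'),('2','२'),('3','३'),('4','४'),('5','५'),('6','६'),('7','७'),('8','८'),('9','९')]

def to_nepali_numerals (number : Int) : String :=
  String.ofList ((PySem.Int.toChars number).map (fun digit => npDict.getD digit digit))

-- ===== PORT B =====
-- divmod recursion of Source B on the non-negative part (q, r = divmod(n, 10))
def nepAux (n : Nat) : List Char :=
  let q := n / 10
  let r := n % 10
  if h : q = 0 then [Char.ofNat (0x0966 + r)]
  else nepAux q ++ [Char.ofNat (0x0966 + r)]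
decreasing_by
  have hn : n ≠ 0 := by rintro rfl; exact h rfl
  exact Nat.div_lt_self (by omega) (by omega)

def to_nepali_numerals_alt (number : Int) : String :=
  if number < 0 then String.ofList ('-' :: nepAux (-number).toNat)
  else String.ofList (nepAux number.toNat)

-- ===== PRECONDITION & SPEC =====
def Spec_to_nepali_numerals (number : Int) (out : String) : Prop := out = to_nepali_numerals_alt number
instance (number : Int) (out : String) : Decidable (Spec_to_nepali_numerals number out) := by unfold Spec_to_nepali_numerals; infer_instance

-- ===== CLAIM (what is proved, stated in full; the proofs are below) =====
def Claim_equal_to_nepali_numerals : Prop := ∀ (number : Int), Dom_to_nepali_numerals number → Spec_to_nepali_numerals number (to_nepali_numerals number)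

-- ===== LEMMAS AND PROOFS =====
-- A's per-character mapping, abbreviated
def nep (c : Char) : Char := npDict.getD c c

lemma nep_digitChar (r : Nat) (h : r < 10) :
    nep (Nat.digitChar r) = Char.ofNat (0x0966 + r) := by
  interval_cases r <;> decide

lemma toDigitsCore_acc (b f : Nat) : ∀ (n : Nat) (l : List Char),
    Nat.toDigitsCore b f n l = Nat.toDigitsCore b f n [] ++ l := by
  induction f with
  | zero => intro n l; simp [Nat.toDigitsCore]
  | succ f ih =>
    intro n l
    simp only [Nat.toDigitsCore]
    by_cases h : n / b = 0
    · simp [h]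
    · simp only [h, if_false]
      rw [ih (n / b) (Nat.digitChar (n % b) :: l), ih (n / b) [Nat.digitChar (n % b)]]
      simp

lemma toDigitsCore_map_nep : ∀ (n f : Nat), n < f →
    (Nat.toDigitsCore 10 f n []).map nep = nepAux n := by
  intro n
  induction n using Nat.strong_induction_on with
  | _ n ih =>
    intro f hf
    match f, hf with
    | f + 1, _ =>
      rw [nepAux]
      simp only [Nat.toDigitsCore]
      by_cases h : n / 10 = 0
      · simp [h, nep_digitChar (n % 10) (Nat.mod_lt _ (by omega))]
      · simp only [h, if_false]
        rw [toDigitsCore_acc, List.map_append]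
        have hq : n / 10 < n := Nat.div_lt_self (Nat.pos_of_ne_zero (by omega)) (by omega)
        rw [ih (n / 10) hq f (by omega)]
        simp [nep_digitChar (n % 10) (Nat.mod_lt _ (by omega))]

lemma toDigits_map_nep (n : Nat) : (Nat.toDigits 10 n).map nep = nepAux n :=
  toDigitsCore_map_nep n (n + 1) (Nat.lt_succ_self n)

-- ===== VERDICT (by name: the statement is the Claim_ definition above) =====
theorem to_nepali_numerals_spec : Claim_equal_to_nepali_numerals := by
  intro number _
  unfold Spec_to_nepali_numerals to_nepali_numerals to_nepali_numerals_alt PySem.Int.toChars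
  by_cases h : number < 0
  · have hn : number.natAbs = (-number).toNat := by omega
    simp only [h, if_true, List.map_cons]
    rw [hn]
    exact congrArg String.ofList (congrArg₂ List.cons (by decide) (toDigits_map_nep _))
  · simp only [h, if_false]
    exact congrArg String.ofList (toDigits_map_nep _)
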